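-- pv_equiv track=rewrite | github.com/senyich/Ege-po-informatike | Нарешивание задач/Ким 12670/ex15.py | check
-- ===== SOURCE A (Python) =====
-- def check(A):
--     checka = []
--     for x in range(0,100):
--         for y in range(0,100):
--             f = (x+2*y>A) or (y<x) or (x<30)
--             if f ==1:
--                 checka.append(1)
--             else:
--                 checka.append(0)
--     return all(checka)
-- ===== SOURCE B (Python) =====
-- def check(A):
--     # Closed form: a cell (x,y) fails iff x+2*y <= A and y >= x and x >= 30;
--     # the minimum of x+2*y under those constraints in the grid is 90 (x=y=30),
--     # so all cells pass exactly when A < 90.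
--     return A < 90
-- ===== Notes on version B (the rewrite author's own statement) =====
-- stated objective: faster
-- what changed: Replaced the 100x100 double loop building a 0/1 list and calling all() with the closed form A < 90, derived from minimizing x+2*y over the failing region x>=30, y>=x.
import Mathlib
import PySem

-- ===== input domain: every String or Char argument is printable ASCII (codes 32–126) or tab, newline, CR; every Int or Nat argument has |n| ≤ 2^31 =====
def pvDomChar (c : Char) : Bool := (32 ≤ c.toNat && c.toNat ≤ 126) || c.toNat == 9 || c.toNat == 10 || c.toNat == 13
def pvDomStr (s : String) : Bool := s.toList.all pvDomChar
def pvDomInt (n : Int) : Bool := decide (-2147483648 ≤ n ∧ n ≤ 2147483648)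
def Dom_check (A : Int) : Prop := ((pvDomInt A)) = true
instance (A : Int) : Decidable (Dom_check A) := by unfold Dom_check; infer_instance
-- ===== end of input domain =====

-- B replaces the 100x100 double loop with the closed form A < 90; return value only.
-- ===== PORT A =====
def check (A : Int) : Bool :=
  let checka : List Int :=
    (PySem.List.pyRange 0 100 1).foldl (fun acc x =>
      (PySem.List.pyRange 0 100 1).foldl (fun acc y =>
        let f : Bool := decide (x + 2*y > A) || decide (y < x) || decide (x < 30)
        if f then acc ++ [1] else acc ++ [0]) acc) []
  checka.all (fun v => v != 0)

-- ===== PORT B =====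
def check_alt (A : Int) : Bool := decide (A < 90)

-- ===== PRECONDITION & SPEC =====
def Spec_check (A : Int) (out : Bool) : Prop := out = check_alt A
instance (A : Int) (out : Bool) : Decidable (Spec_check A out) := by unfold Spec_check; infer_instance

-- ===== CLAIM (what is proved, stated in full; the proofs are below) =====
def Claim_equal_check : Prop := ∀ (A : Int), Dom_check A → Spec_check A (check A)

-- ===== LEMMAS AND PROOFS =====

-- ===== VERDICT (by name: the statement is the Claim_ definition above) =====
lemma checka_eq (A : Int) :
    ((PySem.List.pyRange 0 100 1).foldl (fun acc x =>
      (PySem.List.pyRange 0 100 1).foldl (fun acc y =>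
        let f : Bool := decide (x + 2*y > A) || decide (y < x) || decide (x < 30)
        if f then acc ++ [1] else acc ++ [0]) acc) ([] : List Int))
    = (PySem.List.pyRange 0 100 1).flatMap (fun x =>
        (PySem.List.pyRange 0 100 1).map (fun y =>
          if (decide (x + 2*y > A) || decide (y < x) || decide (x < 30) : Bool) then (1:Int) else 0)) := by
  have h1 : ∀ (x : Int) (acc : List Int),
      ((PySem.List.pyRange 0 100 1).foldl (fun acc y =>
        let f : Bool := decide (x + 2*y > A) || decide (y < x) || decide (x < 30)
        if f then acc ++ [1] else acc ++ [0]) acc)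
      = acc ++ (PySem.List.pyRange 0 100 1).map (fun y =>
          if (decide (x + 2*y > A) || decide (y < x) || decide (x < 30) : Bool) then (1:Int) else 0) := by
    intro x acc
    induction (PySem.List.pyRange 0 100 1) generalizing acc with
    | nil => simp
    | cons y ys ih =>
      simp only [List.foldl_cons, List.map_cons, ih]
      by_cases h : (decide (x + 2*y > A) || decide (y < x) || decide (x < 30) : Bool) = true <;>
        simp [h]
  calc _ = [] ++ (PySem.List.pyRange 0 100 1).flatMap (fun x =>
        (PySem.List.pyRange 0 100 1).map (fun y =>
          if (decide (x + 2*y > A) || decide (y < x) || decide (x < 30) : Bool) then (1:Int) else 0)) := by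
        have hfun : (fun (acc : List Int) (x : Int) =>
            (PySem.List.pyRange 0 100 1).foldl (fun acc y =>
              let f : Bool := decide (x + 2*y > A) || decide (y < x) || decide (x < 30)
              if f then acc ++ [1] else acc ++ [0]) acc)
          = (fun acc x => acc ++ (PySem.List.pyRange 0 100 1).map (fun y =>
              if (decide (x + 2*y > A) || decide (y < x) || decide (x < 30) : Bool) then (1:Int) else 0)) :=
          funext fun acc => funext fun x => h1 x acc
        rw [hfun, PySem.List.foldl_append_eq_flatMap]
  _ = _ := by simp

theorem check_spec : Claim_equal_check := by
  intro A _
  unfold Spec_check check check_alt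
  simp only [checka_eq]
  by_cases h : A < 90
  · simp only [decide_eq_true h]
    rw [List.all_eq_true]
    intro v hv
    simp only [List.mem_flatMap, List.mem_map] at hv
    obtain ⟨x, hx, y, hy, rfl⟩ := hv
    rw [PySem.List.mem_pyRange_one] at hx hy
    have : (decide (x + 2*y > A) || decide (y < x) || decide (x < 30) : Bool) = true := by
      by_cases h1 : y < x
      · simp [h1]
      · by_cases h2 : x < 30
        · simp [h2]
        · have : x + 2*y > A := by omega
          simp [this]
    simp [this]
  · simp only [decide_eq_false h]
    rw [List.all_eq_false]
    refine ⟨0, ?_, by decide⟩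
    simp only [List.mem_flatMap, List.mem_map]
    refine ⟨30, ?_, 30, ?_, ?_⟩
    · rw [PySem.List.mem_pyRange_one]; omega
    · rw [PySem.List.mem_pyRange_one]; omega
    · have h1 : ¬ ((30:Int) + 2*30 > A) := by omega
      simp
      omega
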